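-- pv_equiv track=rewrite | github.com/OpenSlides/openslides-backend | openslides_backend/shared/mixins/user_scope_mixin.py | _get_committee_meetings_map
-- ===== SOURCE A (Python) =====
-- def _get_committee_meetings_map(
--     meetings_committee: dict[int, int], committees_manager: set[int]
-- ) -> dict[int, list[int]]:
--     """
--     Returns a mapping of user's committee IDs to the list with meeting IDs
--     he is a member of.
--     """
--     committee_meetings: dict[int, list[int]] = {
--         cid: [] for cid in committees_manager | set(meetings_committee.values())
--     }
--     for meeting, committee in meetings_committee.items():
--         committee_meetings[committee].append(meeting)
--     return committee_meetings
-- ===== SOURCE B (Python) =====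
-- def _get_committee_meetings_map(
--     meetings_committee: dict[int, int], committees_manager: set[int]
-- ) -> dict[int, list[int]]:
--     """
--     Returns a mapping of user's committee IDs to the list with meeting IDs
--     he is a member of.
--     """
--     return {
--         cid: [m for m, c in meetings_committee.items() if c == cid]
--         for cid in committees_manager | set(meetings_committee.values())
--     }
-- ===== Notes on version B (the rewrite author's own statement) =====
-- stated objective: simpler
-- what changed: Replaces A's seed-all-keys-then-scatter-append mutation loop with a single gather comprehension that, for each committee key, filters its meetings directly from the items.
import Mathlib
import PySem

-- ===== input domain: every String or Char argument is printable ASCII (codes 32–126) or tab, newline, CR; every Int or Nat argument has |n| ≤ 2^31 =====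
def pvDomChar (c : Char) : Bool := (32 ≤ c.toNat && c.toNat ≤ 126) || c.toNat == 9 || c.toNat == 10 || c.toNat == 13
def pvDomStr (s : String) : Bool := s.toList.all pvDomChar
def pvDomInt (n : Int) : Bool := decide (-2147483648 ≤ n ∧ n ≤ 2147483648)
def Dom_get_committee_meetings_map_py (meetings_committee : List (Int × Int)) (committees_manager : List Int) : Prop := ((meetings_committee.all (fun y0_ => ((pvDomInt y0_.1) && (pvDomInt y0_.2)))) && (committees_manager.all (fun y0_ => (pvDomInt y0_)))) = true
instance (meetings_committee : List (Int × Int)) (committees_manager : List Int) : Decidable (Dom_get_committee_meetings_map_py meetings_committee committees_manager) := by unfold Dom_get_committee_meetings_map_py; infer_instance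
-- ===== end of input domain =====

-- B replaces A's seed-empty-lists-then-scatter-append loop with a per-key gather comprehension (simpler, not faster).

-- ===== PORT A =====
def get_committee_meetings_map_py (meetings_committee : List (Int × Int)) (committees_manager : List Int) : List (Int × List Int) :=
  -- committees_manager | set(meetings_committee.values())
  let keys : PySem.Set Int :=
    PySem.Set.union committees_manager (PySem.Set.ofList (meetings_committee.map (fun p => p.2)))
  -- {cid: [] for cid in keys}
  let seeded : PySem.Dict Int (List Int) :=
    keys.foldl (fun d cid => d.insert cid []) PySem.Dict.empty
  -- for meeting, committee in items: committee_meetings[committee].append(meeting)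
  -- (the key is always present, so d[committee].append is d.modify with default [])
  let filled : PySem.Dict Int (List Int) :=
    meetings_committee.foldl (fun d p => d.modify p.2 [] (fun l => l ++ [p.1])) seeded
  filled.items

-- ===== PORT B =====
def get_committee_meetings_map_py_alt (meetings_committee : List (Int × Int)) (committees_manager : List Int) : List (Int × List Int) :=
  -- {cid: [m for m, c in items if c == cid] for cid in committees_manager | set(values)}
  ((PySem.Set.union committees_manager (PySem.Set.ofList (meetings_committee.map (fun p => p.2)))).foldl
      (fun d cid =>
        d.insert cid ((meetings_committee.filter (fun p => p.2 == cid)).map (fun p => p.1)))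
      PySem.Dict.empty).items

-- ===== PRECONDITION & SPEC =====
-- Pre_ is only the Python-type invariant of the second argument: it models a set[int], so its
-- list representation holds distinct elements; it excludes no input a Python caller can pass.
def Pre_get_committee_meetings_map_py (meetings_committee : List (Int × Int)) (committees_manager : List Int) : Prop :=
  committees_manager.Nodup
instance (meetings_committee : List (Int × Int)) (committees_manager : List Int) : Decidable (Pre_get_committee_meetings_map_py meetings_committee committees_manager) := by unfold Pre_get_committee_meetings_map_py; infer_instance

def pvWitness_get_committee_meetings_map_py : (List (Int × Int)) × List Int := ([(1, 2), (3, 2), (4, 5)], [2, 7])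

def Spec_get_committee_meetings_map_py (meetings_committee : List (Int × Int)) (committees_manager : List Int) (out : List (Int × List Int)) : Prop := out = get_committee_meetings_map_py_alt meetings_committee committees_manager
instance (meetings_committee : List (Int × Int)) (committees_manager : List Int) (out : List (Int × List Int)) : Decidable (Spec_get_committee_meetings_map_py meetings_committee committees_manager out) := by unfold Spec_get_committee_meetings_map_py; infer_instance

-- ===== CLAIM (what is proved, stated in full; the proofs are below) =====
def Claim_equal_get_committee_meetings_map_py : Prop := ∀ (meetings_committee : List (Int × Int)) (committees_manager : List Int), Dom_get_committee_meetings_map_py meetings_committee committees_manager → Pre_get_committee_meetings_map_py meetings_committee committees_manager → Spec_get_committee_meetings_map_py meetings_committee committees_manager (get_committee_meetings_map_py meetings_committee committees_manager)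

-- ===== LEMMAS AND PROOFS =====

-- seeding with empty lists leaves every getD-with-default-[] at []
theorem pv_getD_seed (l : List Int) (d : PySem.Dict Int (List Int)) (k : Int)
    (h : d.getD k [] = []) :
    (l.foldl (fun d cid => d.insert cid ([] : List Int)) d).getD k [] = [] := by
  induction l generalizing d with
  | nil => simpa using h
  | cons c cs ih =>
    simp only [List.foldl_cons]
    exact ih _ (by rw [PySem.Dict.getD_insert]; split <;> simp [h])

-- the main proof
theorem pv_main (mc : List (Int × Int)) (cm : List Int) (hcm : cm.Nodup) :
    get_committee_meetings_map_py mc cm = get_committee_meetings_map_py_alt mc cm := by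
  unfold get_committee_meetings_map_py get_committee_meetings_map_py_alt
  set keys : PySem.Set Int := PySem.Set.union cm (PySem.Set.ofList (mc.map (fun p => p.2))) with hkeys
  have hknd : keys.Nodup := PySem.Set.nodup_union _ _ hcm
  have hmem : ∀ p ∈ mc, p.2 ∈ keys := by
    intro p hp
    rw [hkeys, PySem.Set.mem_union]
    exact Or.inr ((PySem.Set.mem_ofList _ _).mpr (List.mem_map_of_mem hp))
  set seeded : PySem.Dict Int (List Int) :=
    keys.foldl (fun d cid => d.insert cid []) PySem.Dict.empty with hseeded
  set filled : PySem.Dict Int (List Int) :=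
    mc.foldl (fun d p => d.modify p.2 [] (fun l => l ++ [p.1])) seeded with hfilled
  -- keys of the seeded dict
  have hskeys : seeded.keys = keys := by
    rw [hseeded, PySem.Dict.keys_foldl_insert]
    simp only [PySem.Dict.keys_empty, PySem.Set.update_nil_left]
    exact PySem.Set.ofList_eq_self_of_nodup _ hknd
  -- keys of the filled dict
  have hfkeys : filled.keys = keys := by
    rw [hfilled, PySem.Dict.keys_foldl_modify_key (key := fun p : Int × Int => p.2), hskeys,
        PySem.Set.update_eq_append_filter]
    have hnil : (PySem.Set.ofList (mc.map (fun p => p.2))).filter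
        (fun y => !(PySem.Set.contains keys y)) = [] := by
      rw [List.filter_eq_nil_iff]
      intro y hy
      rcases List.mem_map.mp ((PySem.Set.mem_ofList _ _).mp hy) with ⟨p, hp, rfl⟩
      simpa using hmem p hp
    rw [hnil, List.append_nil]
  have hfnd : filled.keys.Nodup := by rw [hfkeys]; exact hknd
  -- value of the filled dict at each key
  have hval : ∀ k, filled.getD k [] = (mc.filter (fun p => p.2 == k)).map (fun p => p.1) := by
    intro k
    have hswap : mc.foldl (fun d p => d.modify p.2 [] (fun l => l ++ [p.1])) seeded
        = (mc.map (fun p => (p.2, p.1))).foldl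
            (fun d q => d.modify q.1 [] (fun l => l ++ [q.2])) seeded := by
      rw [List.foldl_map]
    rw [hfilled, hswap, PySem.Dict.getD_foldl_modify_append, hseeded,
        pv_getD_seed keys PySem.Dict.empty k (PySem.Dict.getD_empty k [])]
    simp [List.filter_map, List.map_map, Function.comp_def]
  -- A's items, rewritten key by key; B's items via the fresh-keys insert loop
  rw [PySem.Dict.items_eq_map_keys filled hfnd [], hfkeys]
  have hB := PySem.Dict.items_foldl_insert_fresh keys (fun cid : Int => cid)
      (fun cid => (mc.filter (fun p => p.2 == cid)).map (fun p => p.1)) PySem.Dict.empty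
      (fun a _ => PySem.Dict.contains_empty a) (by simpa using hknd)
  refine Eq.trans ?_ hB.symm
  rw [show PySem.Dict.empty.items = ([] : List (Int × List Int)) from rfl]
  simp [hval]

-- ===== VERDICT (by name: the statement is the Claim_ definition above) =====
theorem get_committee_meetings_map_py_spec : Claim_equal_get_committee_meetings_map_py := by
  intro mc cm _ hpre
  unfold Spec_get_committee_meetings_map_py
  exact pv_main mc cm hpre
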